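-- pv_equiv track=rewrite | github.com/shravan-kuchkula/udacity-data-eng-proj2 | street-easy/plugins/helpers/transforms.py | type_of_search
-- ===== SOURCE A (Python) =====
-- def type_of_search(valid_searches):
--     '''
--         Categorize the type of search given a list of searches.
--
--         :params valid_searches: list of searches
--         :return enum('rental_and_sale', 'sale', 'rental', 'none')
--     '''
--     rental = 0
--     sale = 0
--     for item in valid_searches:
--         if item.get('type') == 'Rental':
--             rental = rental + 1
--         elif item.get('type') == 'Sale':
--             sale = sale + 1
--         else:
--             pass
--
--     if rental > 0 and sale > 0:
--         return "rental_and_sale"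
--     elif rental > 0:
--         return "rental"
--     elif sale > 0:
--         return "sale"
--     else:
--         return "none"
-- ===== SOURCE B (Python) =====
-- def _category(item):
--     t = item.get('type')
--     if t == 'Rental':
--         return 'rental'
--     if t == 'Sale':
--         return 'sale'
--     return 'none'
--
--
-- def _join(x, y):
--     # least upper bound in the lattice none < rental, sale < rental_and_sale
--     if x == 'none':
--         return y
--     if y == 'none' or y == x:
--         return x
--     return 'rental_and_sale'
--
--
-- def type_of_search(valid_searches):
--     result = 'none'
--     for item in valid_searches:
--         result = _join(result, _category(item))
--         if result == 'rental_and_sale':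
--             break
--     return result
-- ===== Notes on version B (the rewrite author's own statement) =====
-- stated objective: alternative
-- what changed: Replaces the two counters plus final four-way branch with a join-semilattice fold: each item is mapped to its own category and the categories are combined with a lub operation, short-circuiting once the top element 'rental_and_sale' is reached.
import Mathlib
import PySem

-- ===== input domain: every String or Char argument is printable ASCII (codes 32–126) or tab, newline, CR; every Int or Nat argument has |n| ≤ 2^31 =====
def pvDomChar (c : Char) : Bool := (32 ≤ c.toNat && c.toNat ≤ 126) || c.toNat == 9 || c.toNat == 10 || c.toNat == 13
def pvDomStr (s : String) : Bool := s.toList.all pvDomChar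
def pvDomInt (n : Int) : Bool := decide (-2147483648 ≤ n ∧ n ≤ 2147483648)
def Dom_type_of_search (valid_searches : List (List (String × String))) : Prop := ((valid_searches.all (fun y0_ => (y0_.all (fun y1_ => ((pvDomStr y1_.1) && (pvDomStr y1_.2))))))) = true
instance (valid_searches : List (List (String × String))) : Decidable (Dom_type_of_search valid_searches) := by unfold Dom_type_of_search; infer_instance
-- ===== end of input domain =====

-- B replaces A's two counters and final four-way branch with a join-semilattice fold:
-- each item is mapped to its category and combined with a lub, breaking at the top
-- element "rental_and_sale" (objective: alternative).

-- ===== PORT A =====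
def type_of_search (valid_searches : List (List (String × String))) : String :=
  let rs : Int × Int := valid_searches.foldl (fun acc item =>
    if (PySem.Dict.mk item).get? "type" == some "Rental" then (acc.1 + 1, acc.2)
    else if (PySem.Dict.mk item).get? "type" == some "Sale" then (acc.1, acc.2 + 1)
    else acc) (0, 0)
  if rs.1 > 0 ∧ rs.2 > 0 then "rental_and_sale"
  else if rs.1 > 0 then "rental"
  else if rs.2 > 0 then "sale"
  else "none"

-- ===== PORT B =====
-- _category(item) from Source B
def tosCategory (item : List (String × String)) : String :=
  let t := (PySem.Dict.mk item).get? "type"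
  if t == some "Rental" then "rental"
  else if t == some "Sale" then "sale"
  else "none"

-- _join(x, y) from Source B: lub in the lattice none < rental, sale < rental_and_sale
def tosJoin (x y : String) : String :=
  if x == "none" then y
  else if y == "none" || y == x then x
  else "rental_and_sale"

-- the for-loop of Source B with its break, as structural recursion on the list
def tosLoop (result : String) : List (List (String × String)) → String
  | [] => result
  | item :: rest =>
    let result' := tosJoin result (tosCategory item)
    if result' == "rental_and_sale" then result' else tosLoop result' rest

def type_of_search_alt (valid_searches : List (List (String × String))) : String :=
  tosLoop "none" valid_searches

-- ===== PRECONDITION & SPEC =====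
def Spec_type_of_search (valid_searches : List (List (String × String))) (out : String) : Prop := out = type_of_search_alt valid_searches
instance (valid_searches : List (List (String × String))) (out : String) : Decidable (Spec_type_of_search valid_searches out) := by unfold Spec_type_of_search; infer_instance

-- ===== CLAIM (what is proved, stated in full; the proofs are below) =====
def Claim_equal_type_of_search : Prop := ∀ (valid_searches : List (List (String × String))), Dom_type_of_search valid_searches → Spec_type_of_search valid_searches (type_of_search valid_searches)

-- ===== LEMMAS AND PROOFS =====

-- A's final branch as a function of the counters
def tosState (a b : Int) : String :=
  if a > 0 ∧ b > 0 then "rental_and_sale"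
  else if a > 0 then "rental"
  else if b > 0 then "sale"
  else "none"

-- A's loop body, named for the lemmas
def tosStep (acc : Int × Int) (item : List (String × String)) : Int × Int :=
  if (PySem.Dict.mk item).get? "type" == some "Rental" then (acc.1 + 1, acc.2)
  else if (PySem.Dict.mk item).get? "type" == some "Sale" then (acc.1, acc.2 + 1)
  else acc

-- A's counters never decrease along the fold
theorem tosFold_ge (vs : List (List (String × String))) (a b : Int) :
    a ≤ (vs.foldl tosStep (a, b)).1 ∧ b ≤ (vs.foldl tosStep (a, b)).2 := by
  induction vs generalizing a b with
  | nil => simp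
  | cons x xs ih =>
    simp only [List.foldl_cons]
    unfold tosStep
    split_ifs
    · exact ⟨le_trans (by omega) (ih (a+1) b).1, (ih (a+1) b).2⟩
    · exact ⟨(ih a (b+1)).1, le_trans (by omega) (ih a (b+1)).2⟩
    · exact ih a b

-- Main invariant: B's loop started in the state corresponding to A's counters
-- lands in the state corresponding to A's final counters.
theorem tosLoop_eq_fold (vs : List (List (String × String))) (a b : Int)
    (ha : 0 ≤ a) (hb : 0 ≤ b) :
    tosLoop (tosState a b) vs = tosState (vs.foldl tosStep (a, b)).1 (vs.foldl tosStep (a, b)).2 := by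
  induction vs generalizing a b with
  | nil => simp [tosLoop]
  | cons x xs ih =>
    simp only [List.foldl_cons, tosLoop]
    by_cases hx1 : (PySem.Dict.mk x).get? "type" = some "Rental"
    · have hstep : tosStep (a, b) x = (a + 1, b) := by simp [tosStep, hx1]
      rw [hstep]
      by_cases hbpos : 0 < b
      · -- join yields the top element: break, and the remaining fold keeps both positive
        have hj : tosJoin (tosState a b) (tosCategory x) = "rental_and_sale" := by
          by_cases hapos : 0 < a <;>
            simp [tosState, tosJoin, tosCategory, hx1, hapos, hbpos]
        rw [hj]
        have hge := tosFold_ge xs (a + 1) b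
        simp only [beq_self_eq_true, if_pos]
        have : tosState (xs.foldl tosStep (a + 1, b)).1 (xs.foldl tosStep (a + 1, b)).2
            = "rental_and_sale" := by
          unfold tosState
          rw [if_pos ⟨by omega, by omega⟩]
        rw [this]
      · have hb0 : b = 0 := by omega
        subst hb0
        have hj : tosJoin (tosState a 0) (tosCategory x) = tosState (a + 1) 0 := by
          by_cases hapos : 0 < a <;>
            simp [tosState, tosJoin, tosCategory, hx1, hapos] <;> omega
        rw [hj]
        have hne : (tosState (a + 1) 0 == "rental_and_sale") = false := by
          unfold tosState
          rw [if_neg (by omega : ¬(a + 1 > 0 ∧ (0:Int) > 0)), if_pos (by omega : a + 1 > 0)]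
          decide
        rw [hne]
        simpa using ih (a + 1) 0 (by omega) le_rfl
    · by_cases hx2 : (PySem.Dict.mk x).get? "type" = some "Sale"
      · have hstep : tosStep (a, b) x = (a, b + 1) := by simp [tosStep, hx2]
        rw [hstep]
        by_cases hapos : 0 < a
        · have hj : tosJoin (tosState a b) (tosCategory x) = "rental_and_sale" := by
            by_cases hbpos : 0 < b <;>
              simp [tosState, tosJoin, tosCategory, hx2, hapos, hbpos]
          rw [hj]
          have hge := tosFold_ge xs a (b + 1)
          simp only [beq_self_eq_true, if_pos]
          have : tosState (xs.foldl tosStep (a, b + 1)).1 (xs.foldl tosStep (a, b + 1)).2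
              = "rental_and_sale" := by
            unfold tosState
            rw [if_pos ⟨by omega, by omega⟩]
          rw [this]
        · have ha0 : a = 0 := by omega
          subst ha0
          have hj : tosJoin (tosState 0 b) (tosCategory x) = tosState 0 (b + 1) := by
            by_cases hbpos : 0 < b <;>
              simp [tosState, tosJoin, tosCategory, hx2, hbpos] <;> omega
          rw [hj]
          have hne : (tosState 0 (b + 1) == "rental_and_sale") = false := by
            unfold tosState
            rw [if_neg (by omega : ¬((0:Int) > 0 ∧ b + 1 > 0)), if_neg (by omega : ¬((0:Int) > 0)), if_pos (by omega : b + 1 > 0)]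
            decide
          rw [hne]
          simpa using ih 0 (b + 1) le_rfl (by omega)
      · have hstep : tosStep (a, b) x = (a, b) := by simp [tosStep, hx1, hx2]
        rw [hstep]
        have hj : tosJoin (tosState a b) (tosCategory x) = tosState a b := by
          by_cases hapos : 0 < a <;> by_cases hbpos : 0 < b <;>
            simp [tosState, tosJoin, tosCategory, hx1, hx2, hapos, hbpos]
        rw [hj]
        by_cases htop : 0 < a ∧ 0 < b
        · have hs : tosState a b = "rental_and_sale" := by
            unfold tosState; rw [if_pos ⟨htop.1, htop.2⟩]
          rw [hs]
          have hge := tosFold_ge xs a b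
          simp only [beq_self_eq_true, if_pos]
          have : tosState (xs.foldl tosStep (a, b)).1 (xs.foldl tosStep (a, b)).2
              = "rental_and_sale" := by
            unfold tosState
            rw [if_pos ⟨by omega, by omega⟩]
          rw [this]
        · have hne : (tosState a b == "rental_and_sale") = false := by
            unfold tosState
            rw [if_neg (by tauto : ¬(a > 0 ∧ b > 0))]
            split_ifs <;> decide
          rw [hne]
          simp only [Bool.false_eq_true, if_false]
          exact ih a b ha hb

-- ===== VERDICT (by name: the statement is the Claim_ definition above) =====
theorem type_of_search_spec : Claim_equal_type_of_search := by
  intro vs _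
  unfold Spec_type_of_search type_of_search type_of_search_alt
  have h := tosLoop_eq_fold vs 0 0 le_rfl le_rfl
  have hs : tosState 0 0 = "none" := by simp [tosState]
  rw [hs] at h
  rw [h]
  rfl
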